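-- pv_equiv track=rewrite | github.com/nuuuwan/lanka_data_timeseries | src/lanka_data_timeseries/cbsl/DataBuilder.py | clean_time
-- ===== SOURCE A (Python) =====
-- def clean_time(t: str) -> str:
--     t = t.replace('"', '')
--     MONTHS = [
--         'Jan',
--         'Feb',
--         'Mar',
--         'Apr',
--         'May',
--         'Jun',
--         'Jul',
--         'Aug',
--         'Sep',
--         'Oct',
--         'Nov',
--         'Dec',
--     ]
--     for i, month in enumerate(MONTHS):
--         t = t.replace(month, f'{i+1:02d}')
--     QUARTERS = ['Q1', 'Q2', 'Q3', 'Q4']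
--     for i, quarter in enumerate(QUARTERS):
--         m = (i + 1) * 3
--         t = t.replace(quarter, f'{m:02d}')
--     HALVES = ['H1', 'H2']
--     for i, half in enumerate(HALVES):
--         m = (i + 1) * 6
--         t = t.replace(half, f'{m:02d}')
--
--     if len(t) == 4:
--         t = f'{t}-01-01'
--
--     if len(t) == 7:
--         t = f'{t}-01'
--
--     return t
-- ===== SOURCE B (Python) =====
-- def clean_time(t: str) -> str:
--     # Single left-to-right scan: at each position replace the first matching
--     # token (month/quarter/half) by its two-digit number, instead of 18
--     # sequential full-string replace passes.
--     TOKENS = [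
--         ('Jan', '01'), ('Feb', '02'), ('Mar', '03'), ('Apr', '04'),
--         ('May', '05'), ('Jun', '06'), ('Jul', '07'), ('Aug', '08'),
--         ('Sep', '09'), ('Oct', '10'), ('Nov', '11'), ('Dec', '12'),
--         ('Q1', '03'), ('Q2', '06'), ('Q3', '09'), ('Q4', '12'),
--         ('H1', '06'), ('H2', '12'),
--     ]
--     s = t.replace('"', '')
--     out = []
--     i = 0
--     while i < len(s):
--         for tok, rep in TOKENS:
--             if s.startswith(tok, i):
--                 out.append(rep)
--                 i += len(tok)
--                 break
--         else:
--             out.append(s[i])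
--             i += 1
--     s = ''.join(out)
--     if len(s) == 4:
--         s = f'{s}-01-01'
--     if len(s) == 7:
--         s = f'{s}-01'
--     return s
-- ===== Notes on version B (the rewrite author's own statement) =====
-- stated objective: alternative
-- what changed: B normalizes the string in ONE left-to-right scan that maps each month/quarter/half token to its two-digit number at the position where it occurs, instead of A's 18 sequential full-string replace passes; the two length-padding checks are kept verbatim.
-- intended difference: On strings whose quote-stripped form contains 'QOct','QNov','QDec','HOct','HNov','HDec' or 'HQ4', A's sequential passes cascade (e.g. Oct->10 first turns 'QOct' into 'Q10', which the later Q1->03 pass then mangles to '030'), while B leaves the lone 'Q'/'H' letter alone and returns e.g. 'Q10'; B's value is the intended one since a stray quarter/half letter should not be consumed by a digit produced from an unrelated month replacement. — e.g. on clean_time("QOct"): A returns "030", B returns "Q10"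
import Mathlib
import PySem

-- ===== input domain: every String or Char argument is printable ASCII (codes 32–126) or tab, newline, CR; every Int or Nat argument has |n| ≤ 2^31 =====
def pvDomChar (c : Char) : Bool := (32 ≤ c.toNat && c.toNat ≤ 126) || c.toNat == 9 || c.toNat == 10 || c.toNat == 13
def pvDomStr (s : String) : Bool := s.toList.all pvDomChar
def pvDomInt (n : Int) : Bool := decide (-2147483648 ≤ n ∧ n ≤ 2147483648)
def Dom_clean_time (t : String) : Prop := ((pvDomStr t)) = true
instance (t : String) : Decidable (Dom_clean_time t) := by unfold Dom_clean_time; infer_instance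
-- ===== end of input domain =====

-- B replaces A's 18 sequential full-string replace passes by ONE left-to-right scan over the
-- string (same token table, same padding); on 7 cascade substrings (see D_) the values differ.

-- ===== PORT A =====
-- f'{m:02d}' — exact for 0 ≤ n < 100 (A only formats 1..12)
def pvPad2 (n : Int) : String := if n < 10 then "0" ++ PySem.Int.toStr n else PySem.Int.toStr n

def clean_time (t : String) : String :=
  let t := PySem.Str.replace t "\"" ""
  let months := ["Jan", "Feb", "Mar", "Apr", "May", "Jun", "Jul", "Aug", "Sep", "Oct", "Nov", "Dec"]
  let t := (PySem.List.enumerate months).foldl (fun s p => PySem.Str.replace s p.2 (pvPad2 (p.1 + 1))) t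
  let quarters := ["Q1", "Q2", "Q3", "Q4"]
  let t := (PySem.List.enumerate quarters).foldl (fun s p => PySem.Str.replace s p.2 (pvPad2 ((p.1 + 1) * 3))) t
  let halves := ["H1", "H2"]
  let t := (PySem.List.enumerate halves).foldl (fun s p => PySem.Str.replace s p.2 (pvPad2 ((p.1 + 1) * 6))) t
  let t := if PySem.Str.len t = 4 then t ++ "-01-01" else t
  let t := if PySem.Str.len t = 7 then t ++ "-01" else t
  t

-- ===== PORT B =====
-- B's TOKENS table (the same 18 pairs, used by a single scan)
def pvToks : List (List Char × List Char) :=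
  [(['J','a','n'], ['0','1']), (['F','e','b'], ['0','2']), (['M','a','r'], ['0','3']),
   (['A','p','r'], ['0','4']), (['M','a','y'], ['0','5']), (['J','u','n'], ['0','6']),
   (['J','u','l'], ['0','7']), (['A','u','g'], ['0','8']), (['S','e','p'], ['0','9']),
   (['O','c','t'], ['1','0']), (['N','o','v'], ['1','1']), (['D','e','c'], ['1','2']),
   (['Q','1'], ['0','3']), (['Q','2'], ['0','6']), (['Q','3'], ['0','9']), (['Q','4'], ['1','2']),
   (['H','1'], ['0','6']), (['H','2'], ['1','2'])]

-- the single left-to-right scan of Source B: at each position emit the first matching token's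
-- replacement and jump past it, else copy the character
def pvScanT (toks : List (List Char × List Char)) : List Char → List Char
  | [] => []
  | c :: cs =>
    match toks.find? (fun p => p.1.isPrefixOf (c :: cs)) with
    | some p => p.2 ++ pvScanT toks (cs.drop (p.1.length - 1))
    | none => c :: pvScanT toks cs
termination_by s => s.length
decreasing_by
  · simp only [List.length_cons, List.length_drop]; omega
  · simp only [List.length_cons]; omega

def clean_time_alt (t : String) : String :=
  let s := PySem.Str.replace t "\"" ""
  let s := String.ofList (pvScanT pvToks s.toList)
  let s := if PySem.Str.len s = 4 then s ++ "-01-01" else s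
  let s := if PySem.Str.len s = 7 then s ++ "-01" else s
  s

-- ===== PRECONDITION & SPEC =====
-- On strings whose quote-stripped form contains 'QOct','QNov','QDec','HOct','HNov','HDec' or
-- 'HQ4', A's sequential passes cascade (Oct->10 first turns 'QOct' into 'Q10', which the later
-- Q1->03 pass then mangles to '030'), while B leaves the lone 'Q'/'H' letter alone and returns
-- e.g. 'Q10'; B's value is the intended one: a stray quarter/half letter should not be consumed
-- by a digit produced from an unrelated month replacement.
def D_clean_time (t : String) : Prop :=
  (["QOct", "QNov", "QDec", "HOct", "HNov", "HDec", "HQ4"].any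
    (fun e => PySem.Chars.isIn e.toList (t.toList.filter (fun c => !(c == '"'))))) = true
instance (t : String) : Decidable (D_clean_time t) := by unfold D_clean_time; infer_instance

def Spec_clean_time (t : String) (out : String) : Prop := ¬ D_clean_time t → out = clean_time_alt t
instance (t : String) (out : String) : Decidable (Spec_clean_time t out) := by unfold Spec_clean_time; infer_instance

def pvDiffWitness_clean_time : String := "QOct"
def pvDiffWitnessOut_clean_time : String × String := ("030", "Q10")

-- ===== CLAIM (what is proved, stated in full; the proofs are below) =====
def Claim_unchanged_clean_time : Prop := ∀ (t : String), Dom_clean_time t → Spec_clean_time t (clean_time t)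
def Claim_changed_clean_time : Prop := Dom_clean_time (pvDiffWitness_clean_time) ∧ D_clean_time (pvDiffWitness_clean_time) ∧ clean_time (pvDiffWitness_clean_time) = pvDiffWitnessOut_clean_time.1 ∧ clean_time_alt (pvDiffWitness_clean_time) = pvDiffWitnessOut_clean_time.2 ∧ pvDiffWitnessOut_clean_time.1 ≠ pvDiffWitnessOut_clean_time.2
def Claim_exact_clean_time : Prop := ∀ (t : String), Dom_clean_time t → D_clean_time t → clean_time t ≠ clean_time_alt t

-- ===== LEMMAS AND PROOFS =====

-- the seven cascade substrings of D_clean_time, as character lists (proof-side only)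
def pvExt : List (List Char) :=
  [['Q','O','c','t'], ['Q','N','o','v'], ['Q','D','e','c'],
   ['H','O','c','t'], ['H','N','o','v'], ['H','D','e','c'], ['H','Q','4']]

-- structural counterpart of PySem.Chars.replace for a nonempty pattern
def pvRepl (old new : List Char) : List Char → List Char
  | [] => []
  | c :: cs =>
    if old.isPrefixOf (c :: cs) then new ++ pvRepl old new (cs.drop (old.length - 1))
    else c :: pvRepl old new cs
termination_by s => s.length
decreasing_by
  · simp only [List.length_cons, List.length_drop]; omega
  · simp only [List.length_cons]; omega

lemma pvRepl_nil (old new : List Char) : pvRepl old new [] = [] := by simp [pvRepl]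

lemma pvRepl_cons_pos (old new : List Char) (c : Char) (cs : List Char)
    (h : old <+: (c :: cs)) :
    pvRepl old new (c :: cs) = new ++ pvRepl old new (cs.drop (old.length - 1)) := by
  rw [pvRepl]; simp [List.isPrefixOf_iff_prefix.2 h]

lemma pvRepl_cons_neg (old new : List Char) (c : Char) (cs : List Char)
    (h : ¬ old <+: (c :: cs)) :
    pvRepl old new (c :: cs) = c :: pvRepl old new cs := by
  rw [pvRepl]
  simp only [List.isPrefixOf_iff_prefix]
  rw [if_neg h]

lemma pvRepl_append_self (old new s : List Char) (h : old ≠ []) :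
    pvRepl old new (old ++ s) = new ++ pvRepl old new s := by
  obtain ⟨o, os, rfl⟩ := List.exists_cons_of_ne_nil h
  rw [List.cons_append, pvRepl_cons_pos _ _ _ _ (by simp [List.prefix_append])]
  simp

-- bridge: PySem.Chars.replace = pvRepl for a nonempty pattern
lemma pvGo_eq (old new : List Char) (h : old ≠ []) :
    ∀ (fuel : Nat) (l acc : List Char), l.length ≤ fuel →
      PySem.Chars.replace.go old new fuel l acc = acc.reverse ++ pvRepl old new l := by
  intro fuel
  induction fuel with
  | zero =>
    intro l acc hl
    have : l = [] := List.eq_nil_of_length_eq_zero (Nat.le_zero.mp hl)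
    subst this
    rw [PySem.Chars.replace.go, pvRepl_nil]
  | succ fuel ih =>
    intro l acc hl
    cases l with
    | nil =>
      rw [PySem.Chars.replace.go, pvRepl_nil]
      · simp
      · omega
    | cons c t =>
      by_cases hp : old.isPrefixOf (c :: t)
      · obtain ⟨o, os, rfl⟩ := List.exists_cons_of_ne_nil h
        rw [PySem.Chars.replace.go]
        simp only [hp, if_true]
        rw [ih _ _ (by simp at hl ⊢; omega)]
        rw [pvRepl_cons_pos _ _ _ _ (List.isPrefixOf_iff_prefix.mp hp)]
        simp [List.drop_succ_cons]
      · rw [PySem.Chars.replace.go]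
        rw [if_neg hp, ih _ _ (by simp at hl ⊢; omega),
          pvRepl_cons_neg _ _ _ _ (fun hx => hp (List.isPrefixOf_iff_prefix.mpr hx))]
        simp

lemma pvReplace_eq (old new s : List Char) (h : old ≠ []) :
    PySem.Chars.replace s old new = pvRepl old new s := by
  rw [PySem.Chars.replace]
  simp only [List.isEmpty_iff]
  rw [if_neg h, pvGo_eq old new h s.length s [] le_rfl]
  simp

-- stripping the quotes is a filter
lemma pvReplQuote (s : List Char) :
    pvRepl ['"'] [] s = s.filter (fun c => !(c == '"')) := by
  induction s with
  | nil => rw [pvRepl_nil]; rfl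
  | cons c cs ih =>
    by_cases hc : c = '"'
    · subst hc
      rw [pvRepl_cons_pos _ _ _ _ (by simp [List.cons_prefix_cons])]
      simpa using ih
    · rw [pvRepl_cons_neg _ _ _ _ (by simp [List.cons_prefix_cons]; exact fun h => hc h.symm)]
      simp [hc, ih]

lemma pvFilterQuote (t : String) :
    (PySem.Str.replace t "\"" "").toList = t.toList.filter (fun c => !(c == '"')) := by
  rw [PySem.Str.replace, String.toList_ofList, pvReplace_eq _ _ _ (by decide)]
  exact pvReplQuote t.toList

-- the sequential pipeline: apply the replaces of `rules` in order
def pvG (rules : List (List Char × List Char)) (s : List Char) : List Char :=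
  rules.foldl (fun s p => pvRepl p.1 p.2 s) s

lemma pvG_cons (p : List Char × List Char) (rs : List (List Char × List Char)) (s : List Char) :
    pvG (p :: rs) s = pvG rs (pvRepl p.1 p.2 s) := rfl
lemma pvG_append (r1 r2 : List (List Char × List Char)) (s : List Char) :
    pvG (r1 ++ r2) s = pvG r2 (pvG r1 s) := List.foldl_append
lemma pvG_split (A B : List (List Char × List Char)) (p : List Char × List Char) (s : List Char) :
    pvG (A ++ p :: B) s = pvG B (pvRepl p.1 p.2 (pvG A s)) := by
  rw [show A ++ p :: B = A ++ ([p] ++ B) from rfl, pvG_append, pvG_append, pvG_cons]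
  rfl
lemma pvG_nil_str (rules : List (List Char × List Char)) : pvG rules [] = [] := by
  induction rules with
  | nil => rfl
  | cons p rs ih => rw [pvG_cons, pvRepl_nil]; exact ih

-- "tok matches nowhere inside the block d (not even spanning past its end)"
def pvCnd (tok d : List Char) : Bool :=
  (List.range d.length).all (fun j => !((tok.take (d.length - j)).isPrefixOf (d.drop j)))

lemma pvPref {tok d s : List Char} (h : tok <+: d ++ s) : tok.take d.length <+: d := by
  rcases Nat.le_total tok.length d.length with hle | hge
  · rw [List.prefix_iff_eq_take, List.take_append_of_le_length hle] at h
    rw [List.take_of_length_le hle, h]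
    exact List.take_prefix _ _
  · rw [List.prefix_iff_eq_take] at h
    rw [h, List.take_take, min_eq_left hge, List.take_left]

lemma pvCnd_head {tok d : List Char} (s : List Char) (c : Char) (hc : pvCnd tok (c :: d) = true) :
    ¬ tok <+: (c :: d) ++ s := by
  intro h
  have h0 := pvPref h
  have := (List.all_eq_true.mp hc) 0 (by simp)
  simp only [Nat.sub_zero, List.drop_zero, Bool.not_eq_eq_eq_not, Bool.not_true] at this
  rw [← Bool.not_eq_true, List.isPrefixOf_iff_prefix] at this
  exact absurd h0 (by simpa using this)

lemma pvCnd_tail {tok d : List Char} (c : Char) (hc : pvCnd tok (c :: d) = true) :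
    pvCnd tok d = true := by
  rw [pvCnd, List.all_eq_true]
  intro j hj
  have := (List.all_eq_true.mp hc) (j + 1) (by simp at hj ⊢; omega)
  simpa using this

lemma pvRepl_block {tok d : List Char} (rep : List Char) (hc : pvCnd tok d = true) :
    ∀ s, pvRepl tok rep (d ++ s) = d ++ pvRepl tok rep s := by
  induction d with
  | nil => intro s; rfl
  | cons c d ih =>
    intro s
    have hh := pvCnd_head (d := d) (s := s) c hc
    rw [List.cons_append] at hh
    rw [List.cons_append, pvRepl_cons_neg _ _ _ _ hh, ih (pvCnd_tail c hc)]
    rfl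

lemma pvG_block {rules : List (List Char × List Char)} {d : List Char}
    (hc : ∀ p ∈ rules, pvCnd p.1 d = true) :
    ∀ s, pvG rules (d ++ s) = d ++ pvG rules s := by
  induction rules with
  | nil => intro s; rfl
  | cons p rs ih =>
    intro s
    rw [pvG_cons, pvRepl_block _ (hc p (by simp)), ih (fun q hq => hc q (by simp [hq])),
      pvG_cons]

-- master facts about the literal rule table (checked once by `decide`)
lemma pvMaster_ne (p : List Char × List Char) (hp : p ∈ pvToks) : p.1 ≠ [] ∧ p.2 ≠ [] := by
  fin_cases hp <;> decide

lemma pvMaster_rep (p : List Char × List Char) (hp : p ∈ pvToks) :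
    ∀ q ∈ pvToks, pvCnd q.1 p.2 = true := by
  fin_cases hp <;> decide

lemma pvMaster_repHead (p : List Char × List Char) (hp : p ∈ pvToks) :
    p.2.head? = some '0' ∨ p.2.head? = some '1' := by
  fin_cases hp <;> decide

-- HEADS: running any sub-collection of the rules over c :: cs either keeps the head
-- character, or the head is the first character of the replacement of some rule that
-- matched as a prefix at an intermediate stage.
lemma pvHeads (rules : List (List Char × List Char)) (hsub : ∀ p ∈ rules, p ∈ pvToks) :
    ∀ (c : Char) (cs : List Char),
      pvG rules (c :: cs) = c :: pvG rules cs ∨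
      ∃ (k : Nat) (p : List Char × List Char), rules[k]? = some p ∧
        p.1 <+: pvG (rules.take k) (c :: cs) ∧
        (pvG rules (c :: cs)).head? = p.2.head? := by
  induction rules with
  | nil => intro c cs; left; rfl
  | cons p rs ih =>
    intro c cs
    by_cases hp : p.1 <+: (c :: cs)
    · right
      refine ⟨0, p, rfl, by simpa using hp, ?_⟩
      rw [pvG_cons, pvRepl_cons_pos _ _ _ _ hp,
        pvG_block (fun q hq => pvMaster_rep p (hsub p (by simp)) q (hsub q (by simp [hq])))]
      obtain ⟨x, xs, hx⟩ := List.exists_cons_of_ne_nil (pvMaster_ne p (hsub p (by simp))).2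
      rw [hx]
      simp
    · rw [pvG_cons, pvRepl_cons_neg _ _ _ _ hp]
      rcases ih (fun q hq => hsub q (by simp [hq])) c (pvRepl p.1 p.2 cs) with hL | ⟨k, q, hk, hpre, hh⟩
      · left; rw [hL, pvG_cons]
      · right
        refine ⟨k + 1, q, by simpa using hk, ?_, hh⟩
        rw [List.take_succ_cons, pvG_cons, pvRepl_cons_neg _ _ _ _ hp]
        exact hpre

lemma pvHead_of_prefix {x : Char} {xs l : List Char} (h : (x :: xs) <+: l) :
    l.head? = some x := by
  cases l with
  | nil => simp at h
  | cons a t => rcases List.cons_prefix_cons.mp h with ⟨rfl, -⟩; rfl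

-- prefix-tracking lemmas: a token that is a prefix of the pipeline output was (essentially)
-- already a prefix of the input
lemma pvPfx1 {x : Char} (hx : x ≠ '0' ∧ x ≠ '1')
    (rules : List (List Char × List Char)) (hsub : ∀ p ∈ rules, p ∈ pvToks)
    (cs : List Char) (h : [x] <+: pvG rules cs) : [x] <+: cs := by
  cases cs with
  | nil => rw [pvG_nil_str] at h; simp at h
  | cons c cs' =>
    rcases pvHeads rules hsub c cs' with hL | ⟨k, p, hk, _, hh⟩
    · rw [hL] at h
      rcases List.cons_prefix_cons.mp h with ⟨rfl, -⟩
      exact List.cons_prefix_cons.mpr ⟨rfl, List.nil_prefix⟩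
    · exfalso
      rw [pvHead_of_prefix h] at hh
      rcases pvMaster_repHead p (hsub p (List.mem_of_getElem? hk)) with h' | h' <;>
        rw [h'] at hh <;> simp at hh
      · exact hx.1 hh
      · exact hx.2 hh

lemma pvPfx2 {x y : Char} (hx : x ≠ '0' ∧ x ≠ '1') (hy : y ≠ '0' ∧ y ≠ '1')
    (rules : List (List Char × List Char)) (hsub : ∀ p ∈ rules, p ∈ pvToks)
    (cs : List Char) (h : [x, y] <+: pvG rules cs) : [x, y] <+: cs := by
  cases cs with
  | nil => rw [pvG_nil_str] at h; simp at h
  | cons c cs' =>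
    rcases pvHeads rules hsub c cs' with hL | ⟨k, p, hk, _, hh⟩
    · rw [hL] at h
      rcases List.cons_prefix_cons.mp h with ⟨rfl, h1⟩
      exact List.cons_prefix_cons.mpr ⟨rfl, pvPfx1 hy rules hsub cs' h1⟩
    · exfalso
      rw [pvHead_of_prefix h] at hh
      rcases pvMaster_repHead p (hsub p (List.mem_of_getElem? hk)) with h' | h' <;>
        rw [h'] at hh <;> simp at hh
      · exact hx.1 hh
      · exact hx.2 hh

lemma pvPfx3 {x y z : Char} (hx : x ≠ '0' ∧ x ≠ '1') (hy : y ≠ '0' ∧ y ≠ '1')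
    (hz : z ≠ '0' ∧ z ≠ '1')
    (rules : List (List Char × List Char)) (hsub : ∀ p ∈ rules, p ∈ pvToks)
    (cs : List Char) (h : [x, y, z] <+: pvG rules cs) : [x, y, z] <+: cs := by
  cases cs with
  | nil => rw [pvG_nil_str] at h; simp at h
  | cons c cs' =>
    rcases pvHeads rules hsub c cs' with hL | ⟨k, p, hk, _, hh⟩
    · rw [hL] at h
      rcases List.cons_prefix_cons.mp h with ⟨rfl, h1⟩
      exact List.cons_prefix_cons.mpr ⟨rfl, pvPfx2 hy hz rules hsub cs' h1⟩
    · exfalso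
      rw [pvHead_of_prefix h] at hh
      rcases pvMaster_repHead p (hsub p (List.mem_of_getElem? hk)) with h' | h' <;>
        rw [h'] at hh <;> simp at hh
      · exact hx.1 hh
      · exact hx.2 hh

lemma pvTake12_one (q : List Char × List Char) (hq : q ∈ pvToks.take 12)
    (h1 : q.2.head? = some '1') :
    q.1 = ['O','c','t'] ∨ q.1 = ['N','o','v'] ∨ q.1 = ['D','e','c'] := by
  fin_cases hq <;> simp_all

lemma pvTake16_one (q : List Char × List Char) (hq : q ∈ pvToks.take 16)
    (h1 : q.2.head? = some '1') :
    q.1 = ['O','c','t'] ∨ q.1 = ['N','o','v'] ∨ q.1 = ['D','e','c'] ∨ q.1 = ['Q','4'] := by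
  fin_cases hq <;> simp_all

-- Q1 against the month passes only
lemma pvPfx_Q1 (rules : List (List Char × List Char)) (hsub : ∀ p ∈ rules, p ∈ pvToks.take 12)
    (cs : List Char) (h : ['Q','1'] <+: pvG rules cs) :
    ['Q','1'] <+: cs ∨ ∃ m ∈ [['O','c','t'], ['N','o','v'], ['D','e','c']], ('Q' :: m) <+: cs := by
  have hsub' : ∀ p ∈ rules, p ∈ pvToks := fun p hp => List.mem_of_mem_take (hsub p hp)
  cases cs with
  | nil => rw [pvG_nil_str] at h; simp at h
  | cons c cs' =>
    rcases pvHeads rules hsub' c cs' with hL | ⟨k, p, hk, _, hh⟩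
    · rw [hL] at h
      rcases List.cons_prefix_cons.mp h with ⟨rfl, h1⟩
      cases cs' with
      | nil => rw [pvG_nil_str] at h1; simp at h1
      | cons c2 cs'' =>
        rcases pvHeads rules hsub' c2 cs'' with hL2 | ⟨k2, q, hk2, hq, hh2⟩
        · rw [hL2] at h1
          rcases List.cons_prefix_cons.mp h1 with ⟨rfl, -⟩
          left
          exact List.cons_prefix_cons.mpr ⟨rfl, List.cons_prefix_cons.mpr ⟨rfl, List.nil_prefix⟩⟩
        · rw [pvHead_of_prefix h1] at hh2
          have hsub2 : ∀ p ∈ rules.take k2, p ∈ pvToks :=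
            fun p hp => hsub' p (List.mem_of_mem_take hp)
          have hqm := pvTake12_one q (hsub q (List.mem_of_getElem? hk2)) hh2.symm
          rcases hqm with hq1 | hq1 | hq1 <;> rw [hq1] at hq <;> right
          · exact ⟨_, by simp,
              List.cons_prefix_cons.mpr ⟨rfl, pvPfx3 (by decide) (by decide) (by decide) _ hsub2 _ hq⟩⟩
          · exact ⟨_, by simp,
              List.cons_prefix_cons.mpr ⟨rfl, pvPfx3 (by decide) (by decide) (by decide) _ hsub2 _ hq⟩⟩
          · exact ⟨_, by simp,
              List.cons_prefix_cons.mpr ⟨rfl, pvPfx3 (by decide) (by decide) (by decide) _ hsub2 _ hq⟩⟩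
    · exfalso
      rw [pvHead_of_prefix h] at hh
      rcases pvMaster_repHead p (hsub' p (List.mem_of_getElem? hk)) with h' | h' <;>
        rw [h'] at hh <;> simp at hh

-- H1 against months + quarters
lemma pvPfx_H1 (rules : List (List Char × List Char)) (hsub : ∀ p ∈ rules, p ∈ pvToks.take 16)
    (cs : List Char) (h : ['H','1'] <+: pvG rules cs) :
    ['H','1'] <+: cs ∨ ∃ m ∈ [['O','c','t'], ['N','o','v'], ['D','e','c'], ['Q','4']],
      ('H' :: m) <+: cs := by
  have hsub' : ∀ p ∈ rules, p ∈ pvToks := fun p hp => List.mem_of_mem_take (hsub p hp)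
  cases cs with
  | nil => rw [pvG_nil_str] at h; simp at h
  | cons c cs' =>
    rcases pvHeads rules hsub' c cs' with hL | ⟨k, p, hk, _, hh⟩
    · rw [hL] at h
      rcases List.cons_prefix_cons.mp h with ⟨rfl, h1⟩
      cases cs' with
      | nil => rw [pvG_nil_str] at h1; simp at h1
      | cons c2 cs'' =>
        rcases pvHeads rules hsub' c2 cs'' with hL2 | ⟨k2, q, hk2, hq, hh2⟩
        · rw [hL2] at h1
          rcases List.cons_prefix_cons.mp h1 with ⟨rfl, -⟩
          left
          exact List.cons_prefix_cons.mpr ⟨rfl, List.cons_prefix_cons.mpr ⟨rfl, List.nil_prefix⟩⟩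
        · rw [pvHead_of_prefix h1] at hh2
          have hsub2 : ∀ p ∈ rules.take k2, p ∈ pvToks :=
            fun p hp => hsub' p (List.mem_of_mem_take hp)
          have hqm := pvTake16_one q (hsub q (List.mem_of_getElem? hk2)) hh2.symm
          rcases hqm with hq1 | hq1 | hq1 | hq1 <;> rw [hq1] at hq <;> right
          · exact ⟨_, by simp,
              List.cons_prefix_cons.mpr ⟨rfl, pvPfx3 (by decide) (by decide) (by decide) _ hsub2 _ hq⟩⟩
          · exact ⟨_, by simp,
              List.cons_prefix_cons.mpr ⟨rfl, pvPfx3 (by decide) (by decide) (by decide) _ hsub2 _ hq⟩⟩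
          · exact ⟨_, by simp,
              List.cons_prefix_cons.mpr ⟨rfl, pvPfx3 (by decide) (by decide) (by decide) _ hsub2 _ hq⟩⟩
          · exact ⟨_, by simp,
              List.cons_prefix_cons.mpr ⟨rfl, pvPfx2 (by decide) (by decide) _ hsub2 _ hq⟩⟩
    · exfalso
      rw [pvHead_of_prefix h] at hh
      rcases pvMaster_repHead p (hsub' p (List.mem_of_getElem? hk)) with h' | h' <;>
        rw [h'] at hh <;> simp at hh

-- the 25-token scan (basic tokens plus the cascade outputs of A)
def pvExtRules : List (List Char × List Char) :=
  [(['Q','O','c','t'], ['0','3','0']), (['Q','N','o','v'], ['0','3','1']),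
   (['Q','D','e','c'], ['0','3','2']), (['H','O','c','t'], ['0','6','0']),
   (['H','N','o','v'], ['0','6','1']), (['H','D','e','c'], ['0','6','2']),
   (['H','Q','4'], ['0','6','2'])]

def pvToks25 : List (List Char × List Char) := pvExtRules ++ pvToks

-- no token of the 25 can be a prefix of c :: cs if the pipeline moved its head
lemma pvNoPfx (c : Char) (cs' : List Char)
    (hno : ∀ p ∈ pvToks25, ¬ p.1 <+: (c :: cs')) :
    pvG pvToks (c :: cs') = c :: pvG pvToks cs' := by
  rcases pvHeads pvToks (fun _ h => h) c cs' with hL | ⟨k, p, hk, hpre, _⟩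
  · exact hL
  · exfalso
    have hno2 : ∀ tok ∈ pvToks25.map Prod.fst, ¬ tok <+: (c :: cs') := by
      intro tok htok
      obtain ⟨q, hq, rfl⟩ := List.mem_map.mp htok
      exact hno q hq
    obtain ⟨hklt, hkp⟩ := List.getElem?_eq_some_iff.mp hk
    have hsubtk : ∀ m : Nat, ∀ q ∈ pvToks.take m, q ∈ pvToks :=
      fun m q hq => List.mem_of_mem_take hq
    have hlen : k < 18 := by simpa [pvToks] using hklt
    interval_cases k <;> rw [← hkp] at hpre
    · exact hno2 _ (by decide) (pvPfx3 (by decide) (by decide) (by decide) _ (hsubtk _) _ hpre)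
    · exact hno2 _ (by decide) (pvPfx3 (by decide) (by decide) (by decide) _ (hsubtk _) _ hpre)
    · exact hno2 _ (by decide) (pvPfx3 (by decide) (by decide) (by decide) _ (hsubtk _) _ hpre)
    · exact hno2 _ (by decide) (pvPfx3 (by decide) (by decide) (by decide) _ (hsubtk _) _ hpre)
    · exact hno2 _ (by decide) (pvPfx3 (by decide) (by decide) (by decide) _ (hsubtk _) _ hpre)
    · exact hno2 _ (by decide) (pvPfx3 (by decide) (by decide) (by decide) _ (hsubtk _) _ hpre)
    · exact hno2 _ (by decide) (pvPfx3 (by decide) (by decide) (by decide) _ (hsubtk _) _ hpre)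
    · exact hno2 _ (by decide) (pvPfx3 (by decide) (by decide) (by decide) _ (hsubtk _) _ hpre)
    · exact hno2 _ (by decide) (pvPfx3 (by decide) (by decide) (by decide) _ (hsubtk _) _ hpre)
    · exact hno2 _ (by decide) (pvPfx3 (by decide) (by decide) (by decide) _ (hsubtk _) _ hpre)
    · exact hno2 _ (by decide) (pvPfx3 (by decide) (by decide) (by decide) _ (hsubtk _) _ hpre)
    · exact hno2 _ (by decide) (pvPfx3 (by decide) (by decide) (by decide) _ (hsubtk _) _ hpre)
    · rcases pvPfx_Q1 (pvToks.take 12) (fun q hq => hq) _ hpre with hc | ⟨m, hm, hc⟩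
      · exact hno2 _ (by decide) hc
      · fin_cases hm <;> exact hno2 _ (by decide) hc
    · exact hno2 _ (by decide) (pvPfx2 (by decide) (by decide) _ (hsubtk _) _ hpre)
    · exact hno2 _ (by decide) (pvPfx2 (by decide) (by decide) _ (hsubtk _) _ hpre)
    · exact hno2 _ (by decide) (pvPfx2 (by decide) (by decide) _ (hsubtk _) _ hpre)
    · rcases pvPfx_H1 (pvToks.take 16) (fun q hq => hq) _ hpre with hc | ⟨m, hm, hc⟩
      · exact hno2 _ (by decide) hc
      · fin_cases hm <;> exact hno2 _ (by decide) hc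
    · exact hno2 _ (by decide) (pvPfx2 (by decide) (by decide) _ (hsubtk _) _ hpre)

-- chain lemma for a basic token
lemma pvChain_basic (k : Nat) (tok rep : List Char) (hk : pvToks[k]? = some (tok, rep))
    (h0 : tok ≠ []) (h1 : ∀ p ∈ pvToks.take k, pvCnd p.1 tok = true)
    (h2 : ∀ p ∈ pvToks.drop (k + 1), pvCnd p.1 rep = true) :
    ∀ X, pvG pvToks (tok ++ X) = rep ++ pvG pvToks X := by
  intro X
  obtain ⟨hklt, hkp⟩ := List.getElem?_eq_some_iff.mp hk
  have hsplit : pvToks = pvToks.take k ++ (tok, rep) :: pvToks.drop (k + 1) := by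
    conv_lhs => rw [← List.take_append_drop k pvToks]
    rw [List.drop_eq_getElem_cons hklt, hkp]
  calc pvG pvToks (tok ++ X)
      = pvG (pvToks.take k ++ (tok, rep) :: pvToks.drop (k + 1)) (tok ++ X) := by rw [← hsplit]
    _ = pvG (pvToks.drop (k + 1)) (pvRepl tok rep (pvG (pvToks.take k) (tok ++ X))) := pvG_split _ _ _ _
    _ = pvG (pvToks.drop (k + 1)) (pvRepl tok rep (tok ++ pvG (pvToks.take k) X)) := by
        rw [pvG_block h1]
    _ = pvG (pvToks.drop (k + 1)) (rep ++ pvRepl tok rep (pvG (pvToks.take k) X)) := by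
        rw [pvRepl_append_self _ _ _ h0]
    _ = rep ++ pvG (pvToks.drop (k + 1)) (pvRepl tok rep (pvG (pvToks.take k) X)) := by
        rw [pvG_block h2]
    _ = rep ++ pvG (pvToks.take k ++ (tok, rep) :: pvToks.drop (k + 1)) X := by rw [pvG_split]
    _ = rep ++ pvG pvToks X := by rw [← hsplit]

-- single-step evaluation lemmas for pvRepl on literal-headed strings
lemma pvRepl_miss (o : Char) (os new : List Char) (c : Char) (rest : List Char)
    (h : (c == o) = false) : pvRepl (o::os) new (c :: rest) = c :: pvRepl (o::os) new rest := by
  refine pvRepl_cons_neg _ _ _ _ (fun hp => ?_)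
  rcases List.cons_prefix_cons.mp hp with ⟨rfl, -⟩; simp at h

lemma pvRepl_hit2 (a b : Char) (new : List Char) (rest : List Char) :
    pvRepl [a,b] new (a::b::rest) = new ++ pvRepl [a,b] new rest := by
  rw [pvRepl_cons_pos _ _ _ _ (by simp [List.cons_prefix_cons])]; simp

lemma pvRepl_hit3 (a b d : Char) (new : List Char) (rest : List Char) :
    pvRepl [a,b,d] new (a::b::d::rest) = new ++ pvRepl [a,b,d] new rest := by
  rw [pvRepl_cons_pos _ _ _ _ (by simp [List.cons_prefix_cons])]; simp

lemma pvRepl_miss2b (a b : Char) (new : List Char) (c : Char) (rest : List Char)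
    (h : (c == b) = false) : pvRepl [a,b] new (a::c::rest) = a :: pvRepl [a,b] new (c::rest) := by
  refine pvRepl_cons_neg _ _ _ _ (fun hp => ?_)
  rcases List.cons_prefix_cons.mp hp with ⟨-, hp2⟩
  rcases List.cons_prefix_cons.mp hp2 with ⟨rfl, -⟩; simp at h

-- the seven cascade chains
lemma pvChain_QOct : ∀ X, pvG pvToks (['Q','O','c','t'] ++ X) = ['0','3','0'] ++ pvG pvToks X := by
  intro X
  simp only [pvG, pvToks, List.foldl_cons, List.foldl_nil, List.cons_append, List.nil_append,
    pvRepl_hit2, pvRepl_hit3, pvRepl_miss, Char.reduceBEq]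
lemma pvChain_QNov : ∀ X, pvG pvToks (['Q','N','o','v'] ++ X) = ['0','3','1'] ++ pvG pvToks X := by
  intro X
  simp only [pvG, pvToks, List.foldl_cons, List.foldl_nil, List.cons_append, List.nil_append,
    pvRepl_hit2, pvRepl_hit3, pvRepl_miss, Char.reduceBEq]
lemma pvChain_QDec : ∀ X, pvG pvToks (['Q','D','e','c'] ++ X) = ['0','3','2'] ++ pvG pvToks X := by
  intro X
  simp only [pvG, pvToks, List.foldl_cons, List.foldl_nil, List.cons_append, List.nil_append,
    pvRepl_hit2, pvRepl_hit3, pvRepl_miss, Char.reduceBEq]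
lemma pvChain_HOct : ∀ X, pvG pvToks (['H','O','c','t'] ++ X) = ['0','6','0'] ++ pvG pvToks X := by
  intro X
  simp only [pvG, pvToks, List.foldl_cons, List.foldl_nil, List.cons_append, List.nil_append,
    pvRepl_hit2, pvRepl_hit3, pvRepl_miss, Char.reduceBEq]
lemma pvChain_HNov : ∀ X, pvG pvToks (['H','N','o','v'] ++ X) = ['0','6','1'] ++ pvG pvToks X := by
  intro X
  simp only [pvG, pvToks, List.foldl_cons, List.foldl_nil, List.cons_append, List.nil_append,
    pvRepl_hit2, pvRepl_hit3, pvRepl_miss, Char.reduceBEq]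
lemma pvChain_HDec : ∀ X, pvG pvToks (['H','D','e','c'] ++ X) = ['0','6','2'] ++ pvG pvToks X := by
  intro X
  simp only [pvG, pvToks, List.foldl_cons, List.foldl_nil, List.cons_append, List.nil_append,
    pvRepl_hit2, pvRepl_hit3, pvRepl_miss, Char.reduceBEq]
lemma pvChain_HQ4 : ∀ X, pvG pvToks (['H','Q','4'] ++ X) = ['0','6','2'] ++ pvG pvToks X := by
  intro X
  simp only [pvG, pvToks, List.foldl_cons, List.foldl_nil, List.cons_append, List.nil_append,
    pvRepl_hit2, pvRepl_miss, pvRepl_miss2b, Char.reduceBEq]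

lemma pvChainAll (p : List Char × List Char) (hp : p ∈ pvToks25) :
    ∀ X, pvG pvToks (p.1 ++ X) = p.2 ++ pvG pvToks X := by
  fin_cases hp
  · exact pvChain_QOct
  · exact pvChain_QNov
  · exact pvChain_QDec
  · exact pvChain_HOct
  · exact pvChain_HNov
  · exact pvChain_HDec
  · exact pvChain_HQ4
  · exact pvChain_basic 0 _ _ (by decide) (by decide) (by decide) (by decide)
  · exact pvChain_basic 1 _ _ (by decide) (by decide) (by decide) (by decide)
  · exact pvChain_basic 2 _ _ (by decide) (by decide) (by decide) (by decide)
  · exact pvChain_basic 3 _ _ (by decide) (by decide) (by decide) (by decide)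
  · exact pvChain_basic 4 _ _ (by decide) (by decide) (by decide) (by decide)
  · exact pvChain_basic 5 _ _ (by decide) (by decide) (by decide) (by decide)
  · exact pvChain_basic 6 _ _ (by decide) (by decide) (by decide) (by decide)
  · exact pvChain_basic 7 _ _ (by decide) (by decide) (by decide) (by decide)
  · exact pvChain_basic 8 _ _ (by decide) (by decide) (by decide) (by decide)
  · exact pvChain_basic 9 _ _ (by decide) (by decide) (by decide) (by decide)
  · exact pvChain_basic 10 _ _ (by decide) (by decide) (by decide) (by decide)
  · exact pvChain_basic 11 _ _ (by decide) (by decide) (by decide) (by decide)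
  · exact pvChain_basic 12 _ _ (by decide) (by decide) (by decide) (by decide)
  · exact pvChain_basic 13 _ _ (by decide) (by decide) (by decide) (by decide)
  · exact pvChain_basic 14 _ _ (by decide) (by decide) (by decide) (by decide)
  · exact pvChain_basic 15 _ _ (by decide) (by decide) (by decide) (by decide)
  · exact pvChain_basic 16 _ _ (by decide) (by decide) (by decide) (by decide)
  · exact pvChain_basic 17 _ _ (by decide) (by decide) (by decide) (by decide)

-- MAIN: the 18 sequential passes equal the single 25-token scan, on every string
lemma pvMain : ∀ cs : List Char, pvG pvToks cs = pvScanT pvToks25 cs := by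
  have H : ∀ (n : Nat) (cs : List Char), cs.length ≤ n → pvG pvToks cs = pvScanT pvToks25 cs := by
    intro n
    induction n with
    | zero =>
      intro cs h
      have : cs = [] := List.eq_nil_of_length_eq_zero (Nat.le_zero.mp h)
      subst this
      rw [pvG_nil_str, pvScanT]
    | succ n ih =>
      intro cs hlen
      cases cs with
      | nil => rw [pvG_nil_str, pvScanT]
      | cons c cs' =>
        have hlen' : cs'.length ≤ n := by simp only [List.length_cons] at hlen; omega
        rcases hfind : pvToks25.find? (fun p => p.1.isPrefixOf (c :: cs')) with _ | p
        · have hno : ∀ p ∈ pvToks25, ¬ p.1 <+: (c :: cs') := by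
            intro p hp hpre
            have h1 := List.find?_eq_none.mp hfind p hp
            rw [List.isPrefixOf_iff_prefix.mpr hpre] at h1
            simp at h1
          rw [pvNoPfx c cs' hno, pvScanT, hfind, ih cs' hlen']
        · have hp25 : p ∈ pvToks25 := List.mem_of_find?_eq_some hfind
          have hpt := List.find?_some hfind
          have hpre : p.1 <+: (c :: cs') := List.isPrefixOf_iff_prefix.mp hpt
          obtain ⟨rest, hrest⟩ := hpre
          have hne : p.1 ≠ [] := by fin_cases hp25 <;> decide
          obtain ⟨o, os, ho⟩ := List.exists_cons_of_ne_nil hne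
          have h4 : cs' = os ++ rest := by
            rw [ho] at hrest
            have := congrArg List.tail hrest
            simpa using this.symm
          have h3 : cs'.drop (p.1.length - 1) = rest := by
            rw [ho, h4]
            simp
          have h1 : pvG pvToks (c :: cs') = p.2 ++ pvG pvToks rest := by
            rw [← hrest]; exact pvChainAll p hp25 rest
          have hlrest : rest.length ≤ n := by
            have h5 := congrArg List.length h4
            simp [List.length_append] at h5
            omega
          rw [h1, pvScanT, hfind]
          show p.2 ++ pvG pvToks rest = p.2 ++ pvScanT pvToks25 (cs'.drop (p.1.length - 1))
          rw [h3, ih rest hlrest]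
  exact fun cs => H cs.length cs le_rfl

-- on strings without cascade substrings the 25-token scan is the 18-token scan
lemma pvScan25_eq (u : List Char) (hu : ∀ e ∈ pvExt, ¬ e <:+: u) :
    ∀ s : List Char, s <:+ u → pvScanT pvToks25 s = pvScanT pvToks s := by
  have H : ∀ (n : Nat) (s : List Char), s.length ≤ n → s <:+ u →
      pvScanT pvToks25 s = pvScanT pvToks s := by
    intro n
    induction n with
    | zero =>
      intro s h _
      have : s = [] := List.eq_nil_of_length_eq_zero (Nat.le_zero.mp h)
      subst this
      rw [pvScanT, pvScanT]
    | succ n ih =>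
      intro s hlen hsuf
      cases s with
      | nil => rw [pvScanT, pvScanT]
      | cons c cs' =>
        have hlen' : cs'.length ≤ n := by simp only [List.length_cons] at hlen; omega
        have hext : pvExtRules.find? (fun p => p.1.isPrefixOf (c :: cs')) = none := by
          rw [List.find?_eq_none]
          intro p hp
          show ¬ p.1.isPrefixOf (c :: cs') = true
          rw [List.isPrefixOf_iff_prefix]
          intro hpre
          have hmem : p.1 ∈ pvExt := by fin_cases hp <;> decide
          exact hu p.1 hmem (hpre.isInfix.trans hsuf.isInfix)
        have hfind : pvToks25.find? (fun p => p.1.isPrefixOf (c :: cs'))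
            = pvToks.find? (fun p => p.1.isPrefixOf (c :: cs')) := by
          rw [pvToks25, List.find?_append, hext]
          rfl
        rcases hfind18 : pvToks.find? (fun p => p.1.isPrefixOf (c :: cs')) with _ | p
        · rw [pvScanT, pvScanT, hfind, hfind18]
          show c :: pvScanT pvToks25 cs' = c :: pvScanT pvToks cs'
          rw [ih cs' hlen' ((List.suffix_cons c cs').trans hsuf)]
        · rw [pvScanT, pvScanT, hfind, hfind18]
          show p.2 ++ pvScanT pvToks25 (cs'.drop (p.1.length - 1))
              = p.2 ++ pvScanT pvToks (cs'.drop (p.1.length - 1))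
          rw [ih (cs'.drop (p.1.length - 1)) (by simp only [List.length_drop]; omega)
            (((List.drop_suffix _ _).trans (List.suffix_cons c cs')).trans hsuf)]
  exact fun s => H s.length s le_rfl

-- assembling the string-level ports
def pvPadStr (s : String) : String :=
  let s := if PySem.Str.len s = 4 then s ++ "-01-01" else s
  let s := if PySem.Str.len s = 7 then s ++ "-01" else s
  s

lemma pvStrG (rules : List (String × String)) (h : ∀ p ∈ rules, p.1.toList ≠ []) :
    ∀ s : String, rules.foldl (fun s p => PySem.Str.replace s p.1 p.2) s
      = String.ofList (pvG (rules.map (fun p => (p.1.toList, p.2.toList))) s.toList) := by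
  induction rules with
  | nil => intro s; simp [pvG]
  | cons p rs ih =>
    intro s
    simp only [List.foldl_cons, List.map_cons]
    rw [ih (fun q hq => h q (by simp [hq])), pvG_cons]
    congr 2
    show (PySem.Str.replace s p.1 p.2).toList = pvRepl p.1.toList p.2.toList s.toList
    rw [PySem.Str.replace, String.toList_ofList, pvReplace_eq _ _ _ (h p (by simp))]

lemma pvA_eq (t : String) :
    clean_time t
      = pvPadStr (String.ofList (pvG pvToks (PySem.Str.replace t "\"" "").toList)) := by
  have key : ∀ s : String,
      (PySem.List.enumerate ["H1", "H2"]).foldl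
          (fun s p => PySem.Str.replace s p.2 (pvPad2 ((p.1 + 1) * 6)))
        ((PySem.List.enumerate ["Q1", "Q2", "Q3", "Q4"]).foldl
            (fun s p => PySem.Str.replace s p.2 (pvPad2 ((p.1 + 1) * 3)))
          ((PySem.List.enumerate
                ["Jan", "Feb", "Mar", "Apr", "May", "Jun", "Jul", "Aug", "Sep", "Oct", "Nov", "Dec"]).foldl
              (fun s p => PySem.Str.replace s p.2 (pvPad2 (p.1 + 1))) s))
      = String.ofList (pvG pvToks s.toList) := by
    intro s
    rw [show ∀ u : String, (PySem.List.enumerate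
          ["Jan", "Feb", "Mar", "Apr", "May", "Jun", "Jul", "Aug", "Sep", "Oct", "Nov", "Dec"]).foldl
          (fun s p => PySem.Str.replace s p.2 (pvPad2 (p.1 + 1))) u
        = ([("Jan","01"),("Feb","02"),("Mar","03"),("Apr","04"),("May","05"),("Jun","06"),
            ("Jul","07"),("Aug","08"),("Sep","09"),("Oct","10"),("Nov","11"),("Dec","12")]).foldl
          (fun s p => PySem.Str.replace s p.1 p.2) u from fun _ => rfl]
    rw [show ∀ u : String, (PySem.List.enumerate ["Q1", "Q2", "Q3", "Q4"]).foldl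
          (fun s p => PySem.Str.replace s p.2 (pvPad2 ((p.1 + 1) * 3))) u
        = ([("Q1","03"),("Q2","06"),("Q3","09"),("Q4","12")]).foldl
          (fun s p => PySem.Str.replace s p.1 p.2) u from fun _ => rfl]
    rw [show ∀ u : String, (PySem.List.enumerate ["H1", "H2"]).foldl
          (fun s p => PySem.Str.replace s p.2 (pvPad2 ((p.1 + 1) * 6))) u
        = ([("H1","06"),("H2","12")]).foldl
          (fun s p => PySem.Str.replace s p.1 p.2) u from fun _ => rfl]
    rw [pvStrG _ (by decide), pvStrG _ (by decide), pvStrG _ (by decide)]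
    simp only [String.toList_ofList]
    rw [← pvG_append, ← pvG_append]
    rfl
  exact congrArg pvPadStr (key (PySem.Str.replace t "\"" ""))

lemma pvB_eq (t : String) :
    clean_time_alt t
      = pvPadStr (String.ofList (pvScanT pvToks (PySem.Str.replace t "\"" "").toList)) := by
  rfl

-- shapes of the two scans on the seven cascade substrings (find? facts are by `rfl`)
lemma pvS18_QOct : ∀ X, pvScanT pvToks (['Q','O','c','t'] ++ X) = 'Q'::'1'::'0':: pvScanT pvToks X := by
  intro X
  simp only [List.cons_append, List.nil_append]
  rw [pvScanT,
    show pvToks.find? (fun p => p.1.isPrefixOf ('Q' :: 'O' :: 'c' :: 't' :: X)) = none from rfl,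
    pvScanT,
    show pvToks.find? (fun p => p.1.isPrefixOf ('O' :: 'c' :: 't' :: X))
      = some (['O','c','t'], ['1','0']) from rfl]
  norm_num

lemma pvS18_QNov : ∀ X, pvScanT pvToks (['Q','N','o','v'] ++ X) = 'Q'::'1'::'1':: pvScanT pvToks X := by
  intro X
  simp only [List.cons_append, List.nil_append]
  rw [pvScanT,
    show pvToks.find? (fun p => p.1.isPrefixOf ('Q' :: 'N' :: 'o' :: 'v' :: X)) = none from rfl,
    pvScanT,
    show pvToks.find? (fun p => p.1.isPrefixOf ('N' :: 'o' :: 'v' :: X))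
      = some (['N','o','v'], ['1','1']) from rfl]
  norm_num

lemma pvS18_QDec : ∀ X, pvScanT pvToks (['Q','D','e','c'] ++ X) = 'Q'::'1'::'2':: pvScanT pvToks X := by
  intro X
  simp only [List.cons_append, List.nil_append]
  rw [pvScanT,
    show pvToks.find? (fun p => p.1.isPrefixOf ('Q' :: 'D' :: 'e' :: 'c' :: X)) = none from rfl,
    pvScanT,
    show pvToks.find? (fun p => p.1.isPrefixOf ('D' :: 'e' :: 'c' :: X))
      = some (['D','e','c'], ['1','2']) from rfl]
  norm_num

lemma pvS18_HOct : ∀ X, pvScanT pvToks (['H','O','c','t'] ++ X) = 'H'::'1'::'0':: pvScanT pvToks X := by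
  intro X
  simp only [List.cons_append, List.nil_append]
  rw [pvScanT,
    show pvToks.find? (fun p => p.1.isPrefixOf ('H' :: 'O' :: 'c' :: 't' :: X)) = none from rfl,
    pvScanT,
    show pvToks.find? (fun p => p.1.isPrefixOf ('O' :: 'c' :: 't' :: X))
      = some (['O','c','t'], ['1','0']) from rfl]
  norm_num

lemma pvS18_HNov : ∀ X, pvScanT pvToks (['H','N','o','v'] ++ X) = 'H'::'1'::'1':: pvScanT pvToks X := by
  intro X
  simp only [List.cons_append, List.nil_append]
  rw [pvScanT,
    show pvToks.find? (fun p => p.1.isPrefixOf ('H' :: 'N' :: 'o' :: 'v' :: X)) = none from rfl,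
    pvScanT,
    show pvToks.find? (fun p => p.1.isPrefixOf ('N' :: 'o' :: 'v' :: X))
      = some (['N','o','v'], ['1','1']) from rfl]
  norm_num

lemma pvS18_HDec : ∀ X, pvScanT pvToks (['H','D','e','c'] ++ X) = 'H'::'1'::'2':: pvScanT pvToks X := by
  intro X
  simp only [List.cons_append, List.nil_append]
  rw [pvScanT,
    show pvToks.find? (fun p => p.1.isPrefixOf ('H' :: 'D' :: 'e' :: 'c' :: X)) = none from rfl,
    pvScanT,
    show pvToks.find? (fun p => p.1.isPrefixOf ('D' :: 'e' :: 'c' :: X))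
      = some (['D','e','c'], ['1','2']) from rfl]
  norm_num

lemma pvS18_HQ4 : ∀ X, pvScanT pvToks (['H','Q','4'] ++ X) = 'H'::'1'::'2':: pvScanT pvToks X := by
  intro X
  simp only [List.cons_append, List.nil_append]
  rw [pvScanT,
    show pvToks.find? (fun p => p.1.isPrefixOf ('H' :: 'Q' :: '4' :: X)) = none from rfl,
    pvScanT,
    show pvToks.find? (fun p => p.1.isPrefixOf ('Q' :: '4' :: X))
      = some (['Q','4'], ['1','2']) from rfl]
  norm_num

lemma pvS25_QOct : ∀ X, pvScanT pvToks25 (['Q','O','c','t'] ++ X) = '0'::'3'::'0':: pvScanT pvToks25 X := by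
  intro X
  simp only [List.cons_append, List.nil_append]
  rw [pvScanT, show pvToks25.find? (fun p => p.1.isPrefixOf ('Q' :: 'O' :: 'c' :: 't' :: X))
      = some (['Q','O','c','t'], ['0','3','0']) from rfl]
  norm_num

lemma pvS25_QNov : ∀ X, pvScanT pvToks25 (['Q','N','o','v'] ++ X) = '0'::'3'::'1':: pvScanT pvToks25 X := by
  intro X
  simp only [List.cons_append, List.nil_append]
  rw [pvScanT, show pvToks25.find? (fun p => p.1.isPrefixOf ('Q' :: 'N' :: 'o' :: 'v' :: X))
      = some (['Q','N','o','v'], ['0','3','1']) from rfl]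
  norm_num

lemma pvS25_QDec : ∀ X, pvScanT pvToks25 (['Q','D','e','c'] ++ X) = '0'::'3'::'2':: pvScanT pvToks25 X := by
  intro X
  simp only [List.cons_append, List.nil_append]
  rw [pvScanT, show pvToks25.find? (fun p => p.1.isPrefixOf ('Q' :: 'D' :: 'e' :: 'c' :: X))
      = some (['Q','D','e','c'], ['0','3','2']) from rfl]
  norm_num

lemma pvS25_HOct : ∀ X, pvScanT pvToks25 (['H','O','c','t'] ++ X) = '0'::'6'::'0':: pvScanT pvToks25 X := by
  intro X
  simp only [List.cons_append, List.nil_append]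
  rw [pvScanT, show pvToks25.find? (fun p => p.1.isPrefixOf ('H' :: 'O' :: 'c' :: 't' :: X))
      = some (['H','O','c','t'], ['0','6','0']) from rfl]
  norm_num

lemma pvS25_HNov : ∀ X, pvScanT pvToks25 (['H','N','o','v'] ++ X) = '0'::'6'::'1':: pvScanT pvToks25 X := by
  intro X
  simp only [List.cons_append, List.nil_append]
  rw [pvScanT, show pvToks25.find? (fun p => p.1.isPrefixOf ('H' :: 'N' :: 'o' :: 'v' :: X))
      = some (['H','N','o','v'], ['0','6','1']) from rfl]
  norm_num

lemma pvS25_HDec : ∀ X, pvScanT pvToks25 (['H','D','e','c'] ++ X) = '0'::'6'::'2':: pvScanT pvToks25 X := by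
  intro X
  simp only [List.cons_append, List.nil_append]
  rw [pvScanT, show pvToks25.find? (fun p => p.1.isPrefixOf ('H' :: 'D' :: 'e' :: 'c' :: X))
      = some (['H','D','e','c'], ['0','6','2']) from rfl]
  norm_num

lemma pvS25_HQ4 : ∀ X, pvScanT pvToks25 (['H','Q','4'] ++ X) = '0'::'6'::'2':: pvScanT pvToks25 X := by
  intro X
  simp only [List.cons_append, List.nil_append]
  rw [pvScanT, show pvToks25.find? (fun p => p.1.isPrefixOf ('H' :: 'Q' :: '4' :: X))
      = some (['H','Q','4'], ['0','6','2']) from rfl]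
  norm_num

-- the two scans always produce strings of the same length
lemma pvLenEq : ∀ s : List Char, (pvScanT pvToks25 s).length = (pvScanT pvToks s).length := by
  have H : ∀ (n : Nat) (s : List Char), s.length ≤ n →
      (pvScanT pvToks25 s).length = (pvScanT pvToks s).length := by
    intro n
    induction n with
    | zero =>
      intro s h
      have : s = [] := List.eq_nil_of_length_eq_zero (Nat.le_zero.mp h)
      subst this
      rw [pvScanT, pvScanT]
    | succ n ih =>
      intro s hlen
      cases s with
      | nil => rw [pvScanT, pvScanT]
      | cons c cs =>
        have hlen' : cs.length ≤ n := by simp only [List.length_cons] at hlen; omega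
        rcases hext : pvExtRules.find? (fun p => p.1.isPrefixOf (c :: cs)) with _ | p
        · have hfind : pvToks25.find? (fun p => p.1.isPrefixOf (c :: cs))
              = pvToks.find? (fun p => p.1.isPrefixOf (c :: cs)) := by
            rw [pvToks25, List.find?_append, hext]; rfl
          rcases h18 : pvToks.find? (fun p => p.1.isPrefixOf (c :: cs)) with _ | p
          · rw [pvScanT, pvScanT, hfind, h18]
            simp only [List.length_cons]
            rw [ih cs hlen']
          · rw [pvScanT, pvScanT, hfind, h18]
            simp only [List.length_append]
            rw [ih (cs.drop (p.1.length - 1)) (by simp only [List.length_drop]; omega)]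
        · have hp : p ∈ pvExtRules := List.mem_of_find?_eq_some hext
          have hfs := List.find?_some hext
          have hpre : p.1 <+: (c :: cs) := List.isPrefixOf_iff_prefix.mp hfs
          obtain ⟨rest, hrest⟩ := hpre
          have hrl : rest.length ≤ n := by
            have := congrArg List.length hrest
            have h2 : 1 ≤ p.1.length := by fin_cases hp <;> decide
            simp [List.length_append] at this
            simp only [List.length_cons] at hlen
            omega
          clear hfs hext
          fin_cases hp
          · have e25 := pvS25_QOct rest
            have e18 := pvS18_QOct rest
            simp only [List.cons_append, List.nil_append] at e25 e18 hrest
            rw [← hrest, e25, e18]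
            simp [ih rest hrl]
          · have e25 := pvS25_QNov rest
            have e18 := pvS18_QNov rest
            simp only [List.cons_append, List.nil_append] at e25 e18 hrest
            rw [← hrest, e25, e18]
            simp [ih rest hrl]
          · have e25 := pvS25_QDec rest
            have e18 := pvS18_QDec rest
            simp only [List.cons_append, List.nil_append] at e25 e18 hrest
            rw [← hrest, e25, e18]
            simp [ih rest hrl]
          · have e25 := pvS25_HOct rest
            have e18 := pvS18_HOct rest
            simp only [List.cons_append, List.nil_append] at e25 e18 hrest
            rw [← hrest, e25, e18]
            simp [ih rest hrl]
          · have e25 := pvS25_HNov rest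
            have e18 := pvS18_HNov rest
            simp only [List.cons_append, List.nil_append] at e25 e18 hrest
            rw [← hrest, e25, e18]
            simp [ih rest hrl]
          · have e25 := pvS25_HDec rest
            have e18 := pvS18_HDec rest
            simp only [List.cons_append, List.nil_append] at e25 e18 hrest
            rw [← hrest, e25, e18]
            simp [ih rest hrl]
          · have e25 := pvS25_HQ4 rest
            have e18 := pvS18_HQ4 rest
            simp only [List.cons_append, List.nil_append] at e25 e18 hrest
            rw [← hrest, e25, e18]
            simp [ih rest hrl]
  exact fun s => H s.length s le_rfl

-- an occurrence of a cascade substring survives consuming a block without 'Q'/'H'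
lemma pvShift (e : List Char) (hh : e.head? = some 'Q' ∨ e.head? = some 'H') :
    ∀ (d rest : List Char), (∀ ch ∈ d, ch ≠ 'Q' ∧ ch ≠ 'H') → e <:+: d ++ rest →
      e <:+: rest := by
  intro d
  induction d with
  | nil => intro rest _ h; simpa using h
  | cons ch d' ih =>
    intro rest hd h
    rcases (List.infix_cons_iff).mp h with hpre | hinf
    · exfalso
      cases e with
      | nil => simp at hh
      | cons x e' =>
        rcases List.cons_prefix_cons.mp hpre with ⟨rfl, -⟩
        have := hd x (by simp)
        rcases hh with h' | h' <;> simp at h' <;> simp [h'] at this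
    · exact ih rest (fun c hc => hd c (by simp [hc])) hinf

-- inside D the two scans differ
lemma pvTightInner : ∀ u : List Char, (∃ e ∈ pvExt, e <:+: u) →
    pvScanT pvToks25 u ≠ pvScanT pvToks u := by
  have H : ∀ (n : Nat) (u : List Char), u.length ≤ n → (∃ e ∈ pvExt, e <:+: u) →
      pvScanT pvToks25 u ≠ pvScanT pvToks u := by
    intro n
    induction n with
    | zero =>
      intro u h hex
      have : u = [] := List.eq_nil_of_length_eq_zero (Nat.le_zero.mp h)
      subst this
      obtain ⟨e, he, hinf⟩ := hex
      have : e = [] := by simpa using hinf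
      subst this
      exact absurd he (by decide)
    | succ n ih =>
      intro u hlen hex
      cases u with
      | nil =>
        obtain ⟨e, he, hinf⟩ := hex
        have : e = [] := by simpa using hinf
        subst this
        exact absurd he (by decide)
      | cons c cs =>
        have hlen' : cs.length ≤ n := by simp only [List.length_cons] at hlen; omega
        rcases hext : pvExtRules.find? (fun p => p.1.isPrefixOf (c :: cs)) with _ | p
        · have hfind : pvToks25.find? (fun p => p.1.isPrefixOf (c :: cs))
              = pvToks.find? (fun p => p.1.isPrefixOf (c :: cs)) := by
            rw [pvToks25, List.find?_append, hext]; rfl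
          have hnopre : ∀ q ∈ pvExtRules, ¬ q.1 <+: (c :: cs) := by
            intro q hq hpre
            have h1 := List.find?_eq_none.mp hext q hq
            rw [List.isPrefixOf_iff_prefix.mpr hpre] at h1
            simp at h1
          obtain ⟨e, he, hinf⟩ := hex
          have hnopre1 : ∀ tok ∈ pvExtRules.map Prod.fst, ¬ tok <+: (c :: cs) := by
            intro tok htok
            obtain ⟨q, hq, rfl⟩ := List.mem_map.mp htok
            exact hnopre q hq
          have hecs : e <:+: cs := by
            rcases (List.infix_cons_iff).mp hinf with hpre | hinf'
            · exact absurd hpre (by fin_cases he <;> exact hnopre1 _ (by decide))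
            · exact hinf'
          have hhd : e.head? = some 'Q' ∨ e.head? = some 'H' := by
            fin_cases he
            · exact Or.inl rfl
            · exact Or.inl rfl
            · exact Or.inl rfl
            · exact Or.inr rfl
            · exact Or.inr rfl
            · exact Or.inr rfl
            · exact Or.inr rfl
          rcases h18 : pvToks.find? (fun p => p.1.isPrefixOf (c :: cs)) with _ | p
          · rw [pvScanT, pvScanT, hfind, h18]
            intro heq
            exact ih cs hlen' ⟨e, he, hecs⟩ ((List.cons.injEq _ _ _ _).mp heq).2
          · have hfs := List.find?_some h18
            have hpre : p.1 <+: (c :: cs) := List.isPrefixOf_iff_prefix.mp hfs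
            have hp18 : p ∈ pvToks := List.mem_of_find?_eq_some h18
            obtain ⟨rest, hrest⟩ := hpre
            obtain ⟨o, os, ho⟩ := List.exists_cons_of_ne_nil (pvMaster_ne p hp18).1
            have h4 : cs = os ++ rest := by
              rw [ho] at hrest
              have := congrArg List.tail hrest
              simpa using this.symm
            have h3 : cs.drop (p.1.length - 1) = rest := by
              rw [ho, h4]; simp
            have herest : e <:+: rest := by
              refine pvShift e hhd os rest ?_ (h4 ▸ hecs)
              intro ch hch
              have hallb := List.all_eq_true.mp (List.all_eq_true.mp (show pvToks.all
                  (fun q => q.1.tail.all (fun ch => !(ch == 'Q') && !(ch == 'H'))) = true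
                from by decide) p hp18) ch (by rw [ho]; simpa using hch)
              simp only [Bool.and_eq_true, Bool.not_eq_true', beq_eq_false_iff_ne] at hallb
              exact hallb
            have hrl : rest.length ≤ n := by
              have := congrArg List.length h4
              simp [List.length_append] at this
              omega
            rw [pvScanT, pvScanT, hfind, h18]
            show (p.2 ++ pvScanT pvToks25 (cs.drop (p.1.length - 1)))
              ≠ (p.2 ++ pvScanT pvToks (cs.drop (p.1.length - 1)))
            rw [h3]
            intro heq
            exact ih rest hrl ⟨e, he, herest⟩ (List.append_cancel_left heq)
        · have hp : p ∈ pvExtRules := List.mem_of_find?_eq_some hext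
          have hfs := List.find?_some hext
          have hpre : p.1 <+: (c :: cs) := List.isPrefixOf_iff_prefix.mp hfs
          obtain ⟨rest, hrest⟩ := hpre
          clear hfs hext
          fin_cases hp
          · have e25 := pvS25_QOct rest
            have e18 := pvS18_QOct rest
            simp only [List.cons_append, List.nil_append] at e25 e18 hrest
            rw [← hrest, e25, e18]
            simp
          · have e25 := pvS25_QNov rest
            have e18 := pvS18_QNov rest
            simp only [List.cons_append, List.nil_append] at e25 e18 hrest
            rw [← hrest, e25, e18]
            simp
          · have e25 := pvS25_QDec rest
            have e18 := pvS18_QDec rest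
            simp only [List.cons_append, List.nil_append] at e25 e18 hrest
            rw [← hrest, e25, e18]
            simp
          · have e25 := pvS25_HOct rest
            have e18 := pvS18_HOct rest
            simp only [List.cons_append, List.nil_append] at e25 e18 hrest
            rw [← hrest, e25, e18]
            simp
          · have e25 := pvS25_HNov rest
            have e18 := pvS18_HNov rest
            simp only [List.cons_append, List.nil_append] at e25 e18 hrest
            rw [← hrest, e25, e18]
            simp
          · have e25 := pvS25_HDec rest
            have e18 := pvS18_HDec rest
            simp only [List.cons_append, List.nil_append] at e25 e18 hrest
            rw [← hrest, e25, e18]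
            simp
          · have e25 := pvS25_HQ4 rest
            have e18 := pvS18_HQ4 rest
            simp only [List.cons_append, List.nil_append] at e25 e18 hrest
            rw [← hrest, e25, e18]
            simp
  exact fun u => H u.length u le_rfl

-- equal-length unequal strings stay unequal after the padding step
lemma pvPad_eval (sL : List Char) :
    pvPadStr (String.ofList sL) =
      if sL.length = 4 then String.ofList sL ++ "-01-01"
      else if sL.length = 7 then String.ofList sL ++ "-01"
      else String.ofList sL := by
  unfold pvPadStr
  by_cases h4 : sL.length = 4
  · simp [h4]
  · have h4i : ((sL.length : Int) = 4) = False := eq_false (by omega)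
    by_cases h7 : sL.length = 7
    · simp [PySem.Str.len_eq, h7]
    · have h7f : ((sL.length : Int) = 7) = False := eq_false (by omega)
      simp [PySem.Str.len_eq, h4i, h7f, h7, h4]

lemma pvPadNe (s1 s2 : List Char) (hne : s1 ≠ s2) (hlen : s1.length = s2.length) :
    pvPadStr (String.ofList s1) ≠ pvPadStr (String.ofList s2) := by
  have key : ∀ x : String, String.ofList s1 ++ x ≠ String.ofList s2 ++ x := by
    intro x heq
    apply hne
    have h := congrArg String.toList heq
    simp only [String.toList_append, String.toList_ofList] at h
    exact List.append_cancel_right h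
  have hne' : String.ofList s1 ≠ String.ofList s2 := by
    intro h
    exact hne (by simpa using congrArg String.toList h)
  rw [pvPad_eval, pvPad_eval, hlen]
  by_cases h4 : s2.length = 4
  · rw [if_pos h4, if_pos h4]
    exact key _
  · rw [if_neg h4, if_neg h4]
    by_cases h7 : s2.length = 7
    · rw [if_pos h7, if_pos h7]
      exact key _
    · rw [if_neg h7, if_neg h7]
      exact hne'

-- ===== VERDICT (by name: the statement is the Claim_ definition above) =====
theorem clean_time_spec : Claim_unchanged_clean_time := by
  intro t _ hD
  rw [pvA_eq, pvB_eq]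
  have hu : ∀ e ∈ pvExt, ¬ e <:+: (PySem.Str.replace t "\"" "").toList := by
    intro e he hinf
    apply hD
    unfold D_clean_time
    rw [List.any_eq_true]
    rw [pvFilterQuote] at hinf
    fin_cases he
    · exact ⟨"QOct", by simp, (PySem.Chars.isIn_iff_infix _ _).2 hinf⟩
    · exact ⟨"QNov", by simp, (PySem.Chars.isIn_iff_infix _ _).2 hinf⟩
    · exact ⟨"QDec", by simp, (PySem.Chars.isIn_iff_infix _ _).2 hinf⟩
    · exact ⟨"HOct", by simp, (PySem.Chars.isIn_iff_infix _ _).2 hinf⟩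
    · exact ⟨"HNov", by simp, (PySem.Chars.isIn_iff_infix _ _).2 hinf⟩
    · exact ⟨"HDec", by simp, (PySem.Chars.isIn_iff_infix _ _).2 hinf⟩
    · exact ⟨"HQ4", by simp, (PySem.Chars.isIn_iff_infix _ _).2 hinf⟩
  rw [pvMain, pvScan25_eq _ hu _ List.suffix_rfl]

lemma pvScan_wit : pvScanT pvToks ['Q','O','c','t'] = ['Q','1','0'] := by
  rw [pvScanT]
  rw [show pvToks.find? (fun p => p.1.isPrefixOf ('Q' :: ['O','c','t'])) = none from by rfl]
  rw [pvScanT]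
  rw [show pvToks.find? (fun p => p.1.isPrefixOf ('O' :: ['c','t']))
      = some (['O','c','t'], ['1','0']) from by rfl]
  norm_num
  rw [pvScanT]

set_option maxRecDepth 4096 in
theorem clean_time_changed : Claim_changed_clean_time := by
  unfold Claim_changed_clean_time
  refine ⟨by decide, by decide, by decide, ?_, by decide⟩
  show clean_time_alt "QOct" = "Q10"
  rw [pvB_eq]
  rw [show (PySem.Str.replace "QOct" "\"" "").toList = ['Q','O','c','t'] from by decide]
  rw [pvScan_wit]
  decide

theorem clean_time_tight : Claim_exact_clean_time := by
  intro t _ hD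
  rw [pvA_eq, pvB_eq, pvMain]
  have hex : ∃ e ∈ pvExt, e <:+: (PySem.Str.replace t "\"" "").toList := by
    unfold D_clean_time at hD
    rw [List.any_eq_true] at hD
    obtain ⟨es, hes, hisin⟩ := hD
    refine ⟨es.toList, by fin_cases hes <;> decide, ?_⟩
    rw [pvFilterQuote]
    exact (PySem.Chars.isIn_iff_infix _ _).1 hisin
  exact pvPadNe _ _ (pvTightInner _ hex) (pvLenEq _)
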